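-- pv_equiv track=rewrite | github.com/gbroques/naive-bayes | util/data.py | split_continuous_features
-- ===== SOURCE A (Python) =====
-- def split_continuous_features(X, continuous_columns):
--     """Splits a dataset with continuous and discrete values into two separate datasets.
--
--     :param X: Training vectors with dimension m x n,
--               where m is the number of samples,
--               and n is the number of features.
--     :param continuous_columns: A binary array with 1 denoting which columns are continuous,
--                                and 0 denoting which columns are discrete.
--     :return: A tuple containing the continuous dataset first, followed by the discrete dataset.
--     """
--     continuous_dataset, discrete_dataset = [], []
--     for i in range(len(X)):
--         continuous_dataset.append([])
--         discrete_dataset.append([])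
--         for j in range(len(continuous_columns)):
--             if continuous_columns[j]:
--                 continuous_dataset[i].append(X[i][j])
--             else:
--                 discrete_dataset[i].append(X[i][j])
--
--     return continuous_dataset, discrete_dataset
-- ===== SOURCE B (Python) =====
-- def split_continuous_features(X, continuous_columns):
--     cont_idx = [j for j, c in enumerate(continuous_columns) if c]
--     disc_idx = [j for j, c in enumerate(continuous_columns) if not c]
--     continuous_dataset = [[row[j] for j in cont_idx] for row in X]
--     discrete_dataset = [[row[j] for j in disc_idx] for row in X]
--     return continuous_dataset, discrete_dataset
-- ===== Notes on version B (the rewrite author's own statement) =====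
-- stated objective: simpler
-- what changed: Replaces the per-row per-column branch with index-by-index appends by a precomputed partition of the column indices followed by two index-driven gathers per row.
import Mathlib
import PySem

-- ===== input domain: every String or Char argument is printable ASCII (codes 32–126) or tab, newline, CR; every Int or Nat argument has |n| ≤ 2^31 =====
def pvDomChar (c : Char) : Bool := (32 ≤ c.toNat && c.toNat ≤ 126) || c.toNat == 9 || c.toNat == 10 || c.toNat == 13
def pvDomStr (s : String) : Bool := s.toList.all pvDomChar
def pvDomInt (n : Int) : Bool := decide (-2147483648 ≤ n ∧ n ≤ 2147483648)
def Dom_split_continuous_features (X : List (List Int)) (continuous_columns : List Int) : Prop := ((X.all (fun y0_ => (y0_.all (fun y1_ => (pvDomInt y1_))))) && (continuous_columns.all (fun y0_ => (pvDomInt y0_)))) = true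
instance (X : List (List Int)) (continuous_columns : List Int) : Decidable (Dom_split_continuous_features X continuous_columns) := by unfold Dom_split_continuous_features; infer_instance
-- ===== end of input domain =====

-- ===== PORT A =====
-- B replaces the per-cell branch by a precomputed index partition and two gathers (simpler decomposition, same cost).
-- A raises IndexError when some row is shorter than continuous_columns; Pre_ excludes exactly those inputs.
def split_continuous_features (X : List (List Int)) (continuous_columns : List Int) : List (List Int) × List (List Int) :=
  (PySem.List.pyRange 0 (X.length : Int) 1).foldl (fun acc i =>
    let cont := acc.1 ++ [[]]
    let disc := acc.2 ++ [[]]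
    (PySem.List.pyRange 0 (continuous_columns.length : Int) 1).foldl (fun b j =>
      if PySem.List.pyGetD continuous_columns j 0 ≠ 0 then
        (b.1.modify i.toNat (fun r => r ++ [PySem.List.pyGetD (PySem.List.pyGetD X i []) j 0]), b.2)
      else
        (b.1, b.2.modify i.toNat (fun r => r ++ [PySem.List.pyGetD (PySem.List.pyGetD X i []) j 0]))
      ) (cont, disc)
  ) ([], [])

-- ===== PORT B =====
def split_continuous_features_alt (X : List (List Int)) (continuous_columns : List Int) : List (List Int) × List (List Int) :=
  let cont_idx := ((PySem.List.enumerate continuous_columns).filter (fun p => decide (p.2 ≠ 0))).map (fun p => p.1)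
  let disc_idx := ((PySem.List.enumerate continuous_columns).filter (fun p => decide (p.2 = 0))).map (fun p => p.1)
  (X.map (fun row => cont_idx.map (fun j => PySem.List.pyGetD row j 0)),
   X.map (fun row => disc_idx.map (fun j => PySem.List.pyGetD row j 0)))

-- ===== PRECONDITION & SPEC =====
-- Pre_ excludes exactly the inputs where Python A raises IndexError: a row shorter than continuous_columns.
def Pre_split_continuous_features (X : List (List Int)) (continuous_columns : List Int) : Prop :=
  ∀ row ∈ X, continuous_columns.length ≤ row.length
instance (X : List (List Int)) (continuous_columns : List Int) : Decidable (Pre_split_continuous_features X continuous_columns) := by unfold Pre_split_continuous_features; infer_instance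
def pvWitness_split_continuous_features : List (List Int) × List Int := ([[1,2],[3,4]], [1,0])
def Spec_split_continuous_features (X : List (List Int)) (continuous_columns : List Int) (out : List (List Int) × List (List Int)) : Prop := out = split_continuous_features_alt X continuous_columns
instance (X : List (List Int)) (continuous_columns : List Int) (out : List (List Int) × List (List Int)) : Decidable (Spec_split_continuous_features X continuous_columns out) := by unfold Spec_split_continuous_features; infer_instance

-- ===== CLAIM (what is proved, stated in full; the proofs are below) =====
def Claim_equal_split_continuous_features : Prop := ∀ (X : List (List Int)) (continuous_columns : List Int), Dom_split_continuous_features X continuous_columns → Pre_split_continuous_features X continuous_columns → Spec_split_continuous_features X continuous_columns (split_continuous_features X continuous_columns)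

-- ===== LEMMAS AND PROOFS =====

theorem modify_append_singleton {a : Type} (C : List a) (c : a) (f : a → a) :
    (C ++ [c]).modify C.length f = C ++ [f c] := by
  induction C with
  | nil => simp [List.modify]
  | cons x xs ih => simpa [List.modify] using ih

-- inner loop of A, over an arbitrary index list, on a state whose components end with the row
-- currently being built
theorem inner_loop (cc row : List Int) (L : List Int) :
    ∀ (C D : List (List Int)) (c d : List Int), D.length = C.length →
    L.foldl (fun (b : List (List Int) × List (List Int)) j =>
      if PySem.List.pyGetD cc j 0 ≠ 0 then
        (b.1.modify C.length (fun r => r ++ [PySem.List.pyGetD row j 0]), b.2)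
      else
        (b.1, b.2.modify C.length (fun r => r ++ [PySem.List.pyGetD row j 0]))) (C ++ [c], D ++ [d])
    = (C ++ [c ++ (L.filter (fun j => decide (PySem.List.pyGetD cc j 0 ≠ 0))).map (fun j => PySem.List.pyGetD row j 0)],
       D ++ [d ++ (L.filter (fun j => decide (PySem.List.pyGetD cc j 0 = 0))).map (fun j => PySem.List.pyGetD row j 0)]) := by
  induction L with
  | nil => intro C D c d h; simp
  | cons j L ih =>
    intro C D c d h
    by_cases hj : PySem.List.pyGetD cc j 0 = 0
    · simp only [List.foldl_cons]
      rw [if_neg (show ¬(PySem.List.pyGetD cc j 0 ≠ 0) from fun hne => hne hj)]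
      have hm := modify_append_singleton D d (fun r => r ++ [PySem.List.pyGetD row j 0])
      rw [h] at hm
      rw [hm, ih C D c (d ++ [PySem.List.pyGetD row j 0]) h]
      simp [hj]
    · simp only [List.foldl_cons]
      rw [if_pos hj, modify_append_singleton C c (fun r => r ++ [PySem.List.pyGetD row j 0])]
      rw [ih C D (c ++ [PySem.List.pyGetD row j 0]) d h]
      simp [hj]

-- B's index partition equals A's filtered range of column indices
theorem idx_eq (cc : List Int) (p : Int → Prop) [DecidablePred p] :
    ((PySem.List.enumerate cc).filter (fun q => decide (p q.2))).map (fun q => q.1)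
    = (PySem.List.pyRange 0 (cc.length : Int) 1).filter (fun j => decide (p (PySem.List.pyGetD cc j 0))) := by
  rw [PySem.List.enumerate_eq_map_pyRange (d := 0), List.filter_map, List.map_map]
  simp [Function.comp_def, PySem.List.len]

set_option maxRecDepth 4000 in
theorem outer_loop (X : List (List Int)) (cc : List Int) :
    ∀ n : Nat, n ≤ X.length →
    (PySem.List.pyRange 0 (n : Int) 1).foldl (fun acc i =>
      let cont := acc.1 ++ [([] : List Int)]
      let disc := acc.2 ++ [([] : List Int)]
      (PySem.List.pyRange 0 (cc.length : Int) 1).foldl (fun b j =>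
        if PySem.List.pyGetD cc j 0 ≠ 0 then
          (b.1.modify i.toNat (fun r => r ++ [PySem.List.pyGetD (PySem.List.pyGetD X i []) j 0]), b.2)
        else
          (b.1, b.2.modify i.toNat (fun r => r ++ [PySem.List.pyGetD (PySem.List.pyGetD X i []) j 0]))
        ) (cont, disc)) (([] : List (List Int)), ([] : List (List Int)))
    = ((X.take n).map (fun row => ((PySem.List.pyRange 0 (cc.length : Int) 1).filter (fun j => decide (PySem.List.pyGetD cc j 0 ≠ 0))).map (fun j => PySem.List.pyGetD row j 0)),
       (X.take n).map (fun row => ((PySem.List.pyRange 0 (cc.length : Int) 1).filter (fun j => decide (PySem.List.pyGetD cc j 0 = 0))).map (fun j => PySem.List.pyGetD row j 0))) := by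
  intro n hn
  induction n with
  | zero => simp [PySem.List.pyRange]
  | succ n ih =>
    have hn' : n ≤ X.length := Nat.le_of_succ_le hn
    rw [show ((n + 1 : Nat) : Int) = (n : Int) + 1 by push_cast; ring,
        PySem.List.pyRange_one_succ_right (by positivity), List.foldl_append, ih hn']
    simp only [List.foldl_cons, List.foldl_nil]
    have hlen : ((X.take n).map (fun row => ((PySem.List.pyRange 0 (cc.length : Int) 1).filter (fun j => decide (PySem.List.pyGetD cc j 0 ≠ 0))).map (fun j => PySem.List.pyGetD row j 0))).length = n := by
      simp [Nat.min_eq_left hn']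
    have htoNat : ((n : Int)).toNat = n := by simp
    rw [show ((n:Int)).toNat = (((X.take n).map (fun row => ((PySem.List.pyRange 0 (cc.length : Int) 1).filter (fun j => decide (PySem.List.pyGetD cc j 0 ≠ 0))).map (fun j => PySem.List.pyGetD row j 0))).length) by rw [hlen, htoNat]]
    rw [inner_loop cc (PySem.List.pyGetD X (n : Int) []) _ _ _ _ _ (by simp [Nat.min_eq_left hn'])]
    have hx : PySem.List.pyGetD X (n : Int) [] = X[n]'(by omega) := by
      rw [PySem.List.pyGetD_natCast]; exact List.getD_eq_getElem _ _ _
    have hn2 : n < X.length := by omega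
    rw [hx]
    simp only [List.take_add_one, List.getElem?_eq_getElem hn2, Option.toList_some, List.nil_append]
    simp only [List.map_append, List.map_cons, List.map_nil, List.map_take]

theorem split_continuous_features_spec : Claim_equal_split_continuous_features := by
  intro X cc _ _
  unfold Spec_split_continuous_features split_continuous_features split_continuous_features_alt
  rw [outer_loop X cc X.length le_rfl, List.take_length]
  rw [idx_eq cc (fun v => v ≠ 0), idx_eq cc (fun v => v = 0)]
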